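-- pv_equiv track=rewrite | github.com/AlexanderDLe/Python_DataStructuresAndAlgorithms | Amazon/PowerConsumption.py | powerConsumption
-- ===== SOURCE A (Python) =====
-- def powerConsumption(bootingPower, processingPower, powerMax):
--   maxQ = []
--   getMaxQVal = lambda: bootingPower[maxQ[0]]
--   getMaxQEnd = lambda: bootingPower[maxQ[-1]]
--
--   result = 0
--   n = len(bootingPower)
--   k = 1
--
--   while k <= n:
--     windowSum = 0
--     L = 0
--     R = 0
--
--     while R < n:
--       bootPower = bootingPower[R]
--       procPower = processingPower[R]
--
--       while maxQ and bootPower > getMaxQEnd(): maxQ.pop()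
--       maxQ.append(R)
--       R += 1
--
--       windowSum += procPower
--       windowLen = R - L
--
--       if windowLen == k:
--         netPower = getMaxQVal() + (windowSum * k)
--         if netPower <= powerMax: result = max(result, k)
--
--         windowSum -= processingPower[L]
--         if L == maxQ[0]: maxQ.pop(0)
--
--     k += 1
--
--   return result
-- ===== SOURCE B (Python) =====
-- def powerConsumption(bootingPower, processingPower, powerMax):
--     # Single O(n) pass: a prefix of k machines is feasible when its own maximum
--     # booting power plus k times its total processing power fits in powerMax.
--     best = 0
--     total = 0
--     peak = None
--     k = 0
--     for boot, proc in zip(bootingPower, processingPower):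
--         k += 1
--         total += proc
--         peak = boot if peak is None else max(peak, boot)
--         if peak + total * k <= powerMax:
--             best = k
--     return best
-- ===== Notes on version B (the rewrite author's own statement) =====
-- stated objective: faster
-- what changed: A runs one pass per candidate length k with a monotone max-queue that is never advanced or reset, so every pass k>=2 charges the prefix the GLOBAL maximum booting power; B is a single O(n) pass keeping a running prefix sum and running prefix maximum and recording the last feasible prefix length.
-- intended difference: On inputs where some prefix of length k>=2 is feasible under its own maximum booting power but not under the whole array's maximum, and no longer prefix is feasible, A returns a smaller length computed with the stale global maximum while B returns k; B's is intended because the booting cost of the first k machines is the maximum over exactly those k machines. — e.g. on powerConsumption([1, 1, 9], [0, 0, 9], 2): A returns 1, B returns 2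
import Mathlib
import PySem

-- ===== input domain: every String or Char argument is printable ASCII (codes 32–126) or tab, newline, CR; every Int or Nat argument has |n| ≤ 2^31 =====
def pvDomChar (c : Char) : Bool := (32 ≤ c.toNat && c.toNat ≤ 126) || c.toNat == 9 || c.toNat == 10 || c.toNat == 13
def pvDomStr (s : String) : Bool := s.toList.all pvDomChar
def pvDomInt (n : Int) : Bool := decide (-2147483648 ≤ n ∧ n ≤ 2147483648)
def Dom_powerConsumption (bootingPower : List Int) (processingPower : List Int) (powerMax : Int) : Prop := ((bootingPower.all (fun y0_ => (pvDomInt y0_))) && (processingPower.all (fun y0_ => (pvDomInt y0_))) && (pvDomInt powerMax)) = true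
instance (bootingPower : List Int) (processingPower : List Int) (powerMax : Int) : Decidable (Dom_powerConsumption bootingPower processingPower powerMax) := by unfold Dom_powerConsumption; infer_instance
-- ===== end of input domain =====

-- B changes the algorithm: one O(n) pass with a running prefix sum and running prefix
-- maximum, instead of A's pass-per-length loop with a never-advanced monotone queue
-- (equivalence about return values; A is pure). D_ below states the intended difference.

-- ===== PORT A =====
-- xs[i] for an index the Python code keeps in range (under Pre_): pyGet? with default.
def pvGetD (xs : List Int) (i : Int) : Int := (PySem.List.pyGet? xs i).getD 0

-- 'while maxQ and bootPower > bootingPower[maxQ[-1]]: maxQ.pop()'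
def pvPopEnds (boot : List Int) (bp : Int) (q : List Int) : List Int :=
  (q.reverse.dropWhile (fun e => bp > pvGetD boot e)).reverse

-- one iteration of the inner 'while R < n' loop of pass k; state = (maxQ, result, windowSum, L)
def pvStepA (boot proc : List Int) (pm k : Int)
    (st : List Int × Int × Int × Int) (R : Int) : List Int × Int × Int × Int :=
  let q := st.1; let result := st.2.1; let wsum := st.2.2.1; let L := st.2.2.2
  let bootPower := pvGetD boot R
  let procPower := pvGetD proc R
  let q := pvPopEnds boot bootPower q ++ [R]
  let R' := R + 1
  let wsum := wsum + procPower
  let windowLen := R' - L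
  if windowLen = k then
    let netPower := pvGetD boot (q.head?.getD 0) + wsum * k
    let result := if netPower ≤ pm then max result k else result
    let wsum := wsum - pvGetD proc L
    let q := if L = pvGetD q 0 then q.tail else q
    (q, result, wsum, L)
  else
    (q, result, wsum, L)

-- one pass of the outer 'while k <= n' loop (windowSum = 0, L = 0, R runs 0..n-1)
def pvPassA (boot proc : List Int) (pm k : Int) (qr : List Int × Int) : List Int × Int :=
  let fin := (List.range boot.length).foldl
    (fun st i => pvStepA boot proc pm k st (Int.ofNat i)) (qr.1, qr.2, 0, 0)
  (fin.1, fin.2.1)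

def powerConsumption (bootingPower : List Int) (processingPower : List Int) (powerMax : Int) : Int :=
  ((List.range bootingPower.length).foldl
    (fun qr i => pvPassA bootingPower processingPower powerMax (Int.ofNat i + 1) qr)
    ([], 0)).2

-- ===== PORT B =====
-- Source B: fold over zip(bootingPower, processingPower); state = (best, total, peak, k)
def pvStepB (pm : Int) (st : Int × Int × Option Int × Int) (bp : Int × Int) :
    Int × Int × Option Int × Int :=
  let best := st.1; let total := st.2.1; let peak := st.2.2.1; let k := st.2.2.2
  let k := k + 1
  let total := total + bp.2
  let peak : Option Int := match peak with | none => some bp.1 | some m => some (max m bp.1)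
  if peak.getD 0 + total * k ≤ pm then (k, total, peak, k) else (best, total, peak, k)

def powerConsumption_alt (bootingPower : List Int) (processingPower : List Int) (powerMax : Int) : Int :=
  ((bootingPower.zip processingPower).foldl (pvStepB powerMax) (0, 0, none, 0)).1

-- ===== PRECONDITION & SPEC =====
-- A indexes processingPower[R] for every R < len(bootingPower): a shorter
-- processingPower raises IndexError; exactly those inputs are excluded.
def Pre_powerConsumption (bootingPower : List Int) (processingPower : List Int) (powerMax : Int) : Prop :=
  bootingPower.length ≤ processingPower.length
instance (bootingPower : List Int) (processingPower : List Int) (powerMax : Int) : Decidable (Pre_powerConsumption bootingPower processingPower powerMax) := by unfold Pre_powerConsumption; infer_instance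
def pvWitness_powerConsumption : List Int × List Int × Int := ([2, 1], [1, 1], 9)

-- On inputs where some prefix of length k>=2 is feasible under its own maximum booting
-- power but not under the whole array's maximum, and no longer prefix is feasible, A
-- returns a smaller length computed with the stale global maximum while B returns k;
-- B's is intended because the booting cost of the first k machines is the maximum over
-- exactly those k machines.
abbrev pvOk (b p : List Int) (m : Int) (i k : Nat) : Prop :=
  (b.take i).max?.getD 0 + (p.take k).sum * k ≤ m

def D_powerConsumption (bootingPower : List Int) (processingPower : List Int) (powerMax : Int) : Prop :=
  ∃ k ≤ bootingPower.length, 2 ≤ k ∧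
    pvOk bootingPower processingPower powerMax k k ∧
    ¬ pvOk bootingPower processingPower powerMax bootingPower.length k ∧
    ∀ j ≤ bootingPower.length, pvOk bootingPower processingPower powerMax j j → j ≤ k
instance (bootingPower : List Int) (processingPower : List Int) (powerMax : Int) : Decidable (D_powerConsumption bootingPower processingPower powerMax) := by unfold D_powerConsumption; infer_instance

def Spec_powerConsumption (bootingPower : List Int) (processingPower : List Int) (powerMax : Int) (out : Int) : Prop := ¬ D_powerConsumption bootingPower processingPower powerMax → out = powerConsumption_alt bootingPower processingPower powerMax
instance (bootingPower : List Int) (processingPower : List Int) (powerMax : Int) (out : Int) : Decidable (Spec_powerConsumption bootingPower processingPower powerMax out) := by unfold Spec_powerConsumption; infer_instance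

def pvDiffWitness_powerConsumption : List Int × List Int × Int := ([1, 1, 9], [0, 0, 9], 2)
def pvDiffWitnessOut_powerConsumption : Int × Int := (1, 2)

-- ===== CLAIM (what is proved, stated in full; the proofs are below) =====
def Claim_unchanged_powerConsumption : Prop := ∀ (bootingPower : List Int) (processingPower : List Int) (powerMax : Int), Dom_powerConsumption bootingPower processingPower powerMax → Pre_powerConsumption bootingPower processingPower powerMax → Spec_powerConsumption bootingPower processingPower powerMax (powerConsumption bootingPower processingPower powerMax)
def Claim_changed_powerConsumption : Prop := Dom_powerConsumption (pvDiffWitness_powerConsumption.1) (pvDiffWitness_powerConsumption.2.1) (pvDiffWitness_powerConsumption.2.2) ∧ Pre_powerConsumption (pvDiffWitness_powerConsumption.1) (pvDiffWitness_powerConsumption.2.1) (pvDiffWitness_powerConsumption.2.2) ∧ D_powerConsumption (pvDiffWitness_powerConsumption.1) (pvDiffWitness_powerConsumption.2.1) (pvDiffWitness_powerConsumption.2.2) ∧ powerConsumption (pvDiffWitness_powerConsumption.1) (pvDiffWitness_powerConsumption.2.1) (pvDiffWitness_powerConsumption.2.2) = pvDiffWitnessOut_powerConsumption.1 ∧ powerConsumption_alt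 (pvDiffWitness_powerConsumption.1) (pvDiffWitness_powerConsumption.2.1) (pvDiffWitness_powerConsumption.2.2) = pvDiffWitnessOut_powerConsumption.2 ∧ pvDiffWitnessOut_powerConsumption.1 ≠ pvDiffWitnessOut_powerConsumption.2
def Claim_exact_powerConsumption : Prop := ∀ (bootingPower : List Int) (processingPower : List Int) (powerMax : Int), Dom_powerConsumption bootingPower processingPower powerMax → Pre_powerConsumption bootingPower processingPower powerMax → D_powerConsumption bootingPower processingPower powerMax → powerConsumption bootingPower processingPower powerMax ≠ powerConsumption_alt bootingPower processingPower powerMax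
-- ===== LEMMAS AND PROOFS =====

-- ---- spec-side closed forms ----

def pvPrefFeas (boot proc : List Int) (pm : Int) (k : Nat) : Bool :=
  decide ((boot.take k).max?.getD 0 + (proc.take k).sum * (k : Int) ≤ pm)

theorem pvPref_iff (boot proc : List Int) (pm : Int) (k : Nat) :
    pvPrefFeas boot proc pm k = true ↔
      (boot.take k).max?.getD 0 + (proc.take k).sum * (k : Int) ≤ pm := by
  simp [pvPrefFeas]

-- greatest m' <= m with the prefix (B) test, 0 if none
def pvGB (boot proc : List Int) (pm : Int) : Nat → Nat
  | 0 => 0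
  | m + 1 => if pvPrefFeas boot proc pm (m + 1) then m + 1 else pvGB boot proc pm m

-- the test A's pass k actually performs
def pvPA (boot proc : List Int) (pm : Int) (k : Nat) : Bool :=
  decide ((if k = 1 then pvGetD boot 0 else boot.max?.getD 0) + (proc.take k).sum * (k : Int) ≤ pm)

theorem pvPA_iff (boot proc : List Int) (pm : Int) (k : Nat) :
    pvPA boot proc pm k = true ↔
      (if k = 1 then pvGetD boot 0 else boot.max?.getD 0) + (proc.take k).sum * (k : Int) ≤ pm := by
  simp [pvPA]

def pvGA (boot proc : List Int) (pm : Int) : Nat → Nat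
  | 0 => 0
  | m + 1 => if pvPA boot proc pm (m + 1) then m + 1 else pvGA boot proc pm m

-- ---- generic facts about the 'greatest passing prefix length' recursions ----

theorem pvGB_le (boot proc : List Int) (pm : Int) (m : Nat) : pvGB boot proc pm m ≤ m := by
  induction m with
  | zero => simp [pvGB]
  | succ m ih => unfold pvGB; split <;> omega

theorem pvGA_le (boot proc : List Int) (pm : Int) (m : Nat) : pvGA boot proc pm m ≤ m := by
  induction m with
  | zero => simp [pvGA]
  | succ m ih => unfold pvGA; split <;> omega

theorem pvGB_spec_pass (boot proc : List Int) (pm : Int) (m : Nat) :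
    pvGB boot proc pm m = 0 ∨ pvPrefFeas boot proc pm (pvGB boot proc pm m) := by
  induction m with
  | zero => simp [pvGB]
  | succ m ih => unfold pvGB; split <;> simp_all

theorem pvGB_ge (boot proc : List Int) (pm : Int) (m j : Nat) (hj : j ≤ m)
    (hp : pvPrefFeas boot proc pm j) : j ≤ pvGB boot proc pm m := by
  induction m with
  | zero => omega
  | succ m ih =>
    unfold pvGB; split
    · omega
    · rename_i hnot
      rcases Nat.lt_succ_iff_lt_or_eq.mp (Nat.lt_succ_of_le hj) with h | h
      · exact ih (by omega)
      · exact absurd (h ▸ hp) hnot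

theorem pvGA_spec_pass (boot proc : List Int) (pm : Int) (m : Nat) :
    pvGA boot proc pm m = 0 ∨ pvPA boot proc pm (pvGA boot proc pm m) := by
  induction m with
  | zero => simp [pvGA]
  | succ m ih => unfold pvGA; split <;> simp_all

theorem pvGA_ge (boot proc : List Int) (pm : Int) (m j : Nat) (hj : j ≤ m)
    (hp : pvPA boot proc pm j) : j ≤ pvGA boot proc pm m := by
  induction m with
  | zero => omega
  | succ m ih =>
    unfold pvGA; split
    · omega
    · rename_i hnot
      rcases Nat.lt_succ_iff_lt_or_eq.mp (Nat.lt_succ_of_le hj) with h | h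
      · exact ih (by omega)
      · exact absurd (h ▸ hp) hnot

-- elements of a nonempty prefix are bounded by the list maximum
theorem pvMem_le_max (boot : List Int) (x : Int) (hx : x ∈ boot) :
    x ≤ boot.max?.getD 0 := by
  cases h : boot.max? with
  | none => rw [List.max?_eq_none_iff] at h; simp [h] at hx
  | some a => exact (List.max?_eq_some_iff.mp h).2 x hx

theorem pvTakeMax_le_max (boot : List Int) (k : Nat) (hk : 1 ≤ k) (hn : k ≤ boot.length) :
    (boot.take k).max?.getD 0 ≤ boot.max?.getD 0 := by
  cases h : (boot.take k).max? with
  | none =>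
    rw [List.max?_eq_none_iff] at h
    have : (boot.take k).length = k := by simp; omega
    rw [h] at this; simp at this; omega
  | some a =>
    have ha : a ∈ boot.take k := (List.max?_eq_some_iff.mp h).1
    exact pvMem_le_max boot a (List.mem_of_mem_take ha)

theorem pvGetD_zero_eq_take_one_max (boot : List Int) (hn : 1 ≤ boot.length) :
    pvGetD boot 0 = (boot.take 1).max?.getD 0 := by
  cases boot with
  | nil => simp at hn
  | cons a t => simp [pvGetD, List.max?_cons]

-- A's per-pass test implies B's
theorem pvPA_imp_pref (boot proc : List Int) (pm : Int) (k : Nat) (hk : 1 ≤ k)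
    (hn : k ≤ boot.length) (h : pvPA boot proc pm k) : pvPrefFeas boot proc pm k := by
  rw [pvPA_iff] at h
  rw [pvPref_iff]
  by_cases h1 : k = 1
  · subst h1; rw [← pvGetD_zero_eq_take_one_max boot (by omega)]; simpa using h
  · rw [if_neg h1] at h
    have := pvTakeMax_le_max boot k hk hn
    omega

theorem pvPA_one_iff (boot proc : List Int) (pm : Int) (hn : 1 ≤ boot.length) :
    pvPA boot proc pm 1 ↔ pvPrefFeas boot proc pm 1 := by
  rw [pvPA_iff, pvPref_iff, ← pvGetD_zero_eq_take_one_max boot hn]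
  simp

-- ---- characterization of port B ----

theorem pvMax_concat (l : List Int) (x : Int) :
    (l ++ [x]).max? = some (l.max?.elim x (fun a => max a x)) := by
  induction l with
  | nil => simp [List.max?_cons]
  | cons a t ih =>
    rw [List.cons_append, List.max?_cons, ih, List.max?_cons]
    cases h : t.max? <;> simp [max_assoc]

theorem pvTakeMax_succ (boot : List Int) (m : Nat) (hm : m < boot.length) :
    (boot.take (m + 1)).max? = some ((boot.take m).max?.elim boot[m] (fun a => max a boot[m])) := by
  rw [List.take_succ, List.getElem?_eq_getElem hm]
  exact pvMax_concat _ _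

theorem pvStepB_eval (pm best total : Int) (pk : Option Int) (m : Int) (b p : Int) :
    pvStepB pm (best, total, pk, m) (b, p) =
      (if pk.elim b (fun a => max a b) + (total + p) * (m + 1) ≤ pm
        then (m + 1, total + p, some (pk.elim b (fun a => max a b)), m + 1)
        else (best, total + p, some (pk.elim b (fun a => max a b)), m + 1)) := by
  unfold pvStepB
  cases pk <;> simp [Option.elim]

theorem pvAlt_fold (boot proc : List Int) (pm : Int) (hpre : boot.length ≤ proc.length)
    (m : Nat) (hm : m ≤ boot.length) :
    ((boot.zip proc).take m).foldl (pvStepB pm) (0, 0, none, 0) =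
      ((pvGB boot proc pm m : Int), (proc.take m).sum, (boot.take m).max?, (m : Int)) := by
  induction m with
  | zero => simp [pvGB]
  | succ m ih =>
    have hmb : m < boot.length := by omega
    have hmp : m < proc.length := by omega
    have hz : m < (boot.zip proc).length := by simp [List.length_zip]; omega
    rw [List.take_succ, List.getElem?_eq_getElem hz, List.getElem_zip]
    simp only [Option.toList_some, List.foldl_append, ih (by omega), List.foldl_cons,
      List.foldl_nil, pvStepB_eval]
    have hsum : (proc.take m).sum + proc[m] = (proc.take (m + 1)).sum :=
      (List.sum_take_succ proc m hmp).symm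
    have hpk : ((boot.take m).max?.elim boot[m] (fun a => max a boot[m])) =
        (boot.take (m + 1)).max?.getD 0 := by
      rw [pvTakeMax_succ boot m hmb]; rfl
    have hiff : ((boot.take m).max?.elim boot[m] (fun a => max a boot[m]) +
        ((proc.take m).sum + proc[m]) * ((m : Int) + 1) ≤ pm) ↔
        pvPrefFeas boot proc pm (m + 1) := by
      rw [pvPref_iff, hpk, hsum]
      push_cast
      exact Iff.rfl
    have hmax : some ((boot.take m).max?.elim boot[m] (fun a => max a boot[m])) =
        (boot.take (m + 1)).max? := by
      rw [pvTakeMax_succ boot m hmb]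
    by_cases hp : pvPrefFeas boot proc pm (m + 1)
    · rw [if_pos (hiff.mpr hp)]
      unfold pvGB
      rw [if_pos hp, hmax, hsum]
      push_cast
      exact rfl
    · rw [if_neg (fun hc => hp (hiff.mp hc))]
      conv_rhs => unfold pvGB
      rw [if_neg hp, hmax, hsum]
      push_cast
      exact rfl

theorem pvAlt_eq_gB (boot proc : List Int) (pm : Int) (hpre : boot.length ≤ proc.length) :
    powerConsumption_alt boot proc pm = (pvGB boot proc pm boot.length : Int) := by
  have hlen : (boot.zip proc).length = boot.length := by simp [List.length_zip]; omega
  have := pvAlt_fold boot proc pm hpre boot.length le_rfl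
  rw [← hlen, List.take_length] at this
  unfold powerConsumption_alt
  rw [this, hlen]

-- ---- characterization of port A ----

-- abbreviations for A's queue analysis
def pvApp1 (boot : List Int) (q : List Int) (i : Nat) : List Int :=
  pvPopEnds boot (pvGetD boot (i : Int)) q ++ [(i : Int)]

def pvSortedQ (boot : List Int) (q : List Int) : Prop :=
  q.Pairwise (fun a b => pvGetD boot b ≤ pvGetD boot a)

def pvBoundedQ (n : Nat) (q : List Int) : Prop :=
  ∀ e ∈ q, ∃ i : Nat, i < n ∧ e = (i : Int)

def pvHv (boot : List Int) (q : List Int) : Option Int := q.head?.map (pvGetD boot)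

theorem pvVal_le_peak (boot : List Int) (i : Nat) (hi : i < boot.length) :
    pvGetD boot (i : Int) ≤ boot.max?.getD 0 := by
  have : pvGetD boot (i : Int) = boot[i] := by
    simp [pvGetD, PySem.List.pyGet?_natCast, List.getElem?_eq_getElem hi]
  rw [this]
  exact pvMem_le_max boot _ (List.getElem_mem hi)

theorem pvPop_prefix (boot : List Int) (bp : Int) (q : List Int) :
    pvPopEnds boot bp q <+: q := by
  unfold pvPopEnds
  have h := List.dropWhile_suffix (l := q.reverse) (fun e => decide (bp > pvGetD boot e))
  have := List.reverse_prefix.mpr h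
  simpa using this

theorem pvPop_sorted (boot : List Int) (bp : Int) (q : List Int) (hs : pvSortedQ boot q) :
    pvSortedQ boot (pvPopEnds boot bp q) :=
  List.Pairwise.sublist (pvPop_prefix boot bp q).sublist hs

theorem pvPop_empty_iff (boot : List Int) (bp : Int) (q : List Int) :
    pvPopEnds boot bp q = [] ↔ ∀ e ∈ q, pvGetD boot e < bp := by
  unfold pvPopEnds
  simp [List.dropWhile_eq_nil_iff]

theorem pvLastD_mem (q : List Int) (hne : q ≠ []) : q.getLast?.getD 0 ∈ q := by
  cases hq : q.getLast? with
  | none => rw [List.getLast?_eq_none_iff] at hq; exact absurd hq hne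
  | some x => exact List.mem_of_getLast? hq

theorem pvSorted_head_ge (boot : List Int) (q : List Int) (hs : pvSortedQ boot q)
    (x : Int) (hx : x ∈ q) : pvGetD boot x ≤ pvGetD boot (q.head?.getD 0) := by
  cases q with
  | nil => simp at hx
  | cons a t =>
    rcases hx with _ | hx
    · simp
    · simpa using (List.pairwise_cons.mp hs).1 x (by assumption)

theorem pvSorted_ge_last (boot : List Int) (q : List Int) (hs : pvSortedQ boot q)
    (x : Int) (hx : x ∈ q) : pvGetD boot (q.getLast?.getD 0) ≤ pvGetD boot x := by
  induction q with
  | nil => simp at hx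
  | cons a t ih =>
    cases t with
    | nil => simp at hx; subst hx; simp
    | cons b u =>
      rw [List.getLast?_cons_cons]
      rcases hx with _ | hx
      · have h1 := (List.pairwise_cons.mp hs).1
        have hm : (b :: u).getLast?.getD 0 ∈ b :: u := pvLastD_mem _ (by simp)
        exact h1 _ hm
      · exact ih (List.pairwise_cons.mp hs).2 (by assumption)

theorem pvPop_last_ge (boot : List Int) (bp : Int) (q : List Int)
    (hne : pvPopEnds boot bp q ≠ []) :
    bp ≤ pvGetD boot ((pvPopEnds boot bp q).getLast?.getD 0) := by
  unfold pvPopEnds at *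
  rw [List.getLast?_reverse]
  have h := List.head?_dropWhile_not (fun e => decide (bp > pvGetD boot e)) q.reverse
  cases hh : (q.reverse.dropWhile (fun e => decide (bp > pvGetD boot e))).head? with
  | none => rw [List.head?_eq_none_iff] at hh; simp [hh] at hne
  | some x =>
    rw [hh] at h
    simp at h
    simpa [hh] using h

theorem pvHead_of_prefix {q' q : List Int} (h : q' <+: q) (hne : q' ≠ []) :
    q'.head? = q.head? := by
  obtain ⟨t, rfl⟩ := h
  cases q' with
  | nil => exact absurd rfl hne
  | cons a u => simp

-- every survivor of the pop phase is at least the arriving boot power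
theorem pvPop_all_ge (boot : List Int) (bp : Int) (q : List Int) (hs : pvSortedQ boot q)
    (a : Int) (ha : a ∈ pvPopEnds boot bp q) : bp ≤ pvGetD boot a := by
  have hne : pvPopEnds boot bp q ≠ [] := by intro hc; simp [hc] at ha
  have h1 := pvPop_last_ge boot bp q hne
  have h2 := pvSorted_ge_last boot _ (pvPop_sorted boot bp q hs) a ha
  omega

theorem pvApp1_sorted (boot : List Int) (q : List Int) (i : Nat)
    (hs : pvSortedQ boot q) : pvSortedQ boot (pvApp1 boot q i) := by
  set bp := pvGetD boot (i : Int) with hbp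
  have hps := pvPop_sorted boot bp q hs
  unfold pvSortedQ at *
  rw [pvApp1, List.pairwise_append]
  refine ⟨hps, by simp, ?_⟩
  intro a ha b hb
  simp at hb
  subst hb
  exact pvPop_all_ge boot bp q hs a ha

theorem pvApp1_bounded (boot : List Int) (n : Nat) (q : List Int) (i : Nat) (hi : i < n)
    (hb : pvBoundedQ n q) : pvBoundedQ n (pvApp1 boot q i) := by
  intro e he
  rw [pvApp1, List.mem_append] at he
  rcases he with he | he
  · exact hb e ((pvPop_prefix boot _ q).sublist.mem he)
  · simp at he; exact ⟨i, hi, he⟩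

theorem pvApp1_ne_nil (boot : List Int) (q : List Int) (i : Nat) :
    pvApp1 boot q i ≠ [] := by
  rw [pvApp1]; simp

theorem pvApp1_hv (boot : List Int) (q : List Int) (i : Nat) (hs : pvSortedQ boot q) :
    pvHv boot (pvApp1 boot q i) =
      some (max ((pvHv boot q).getD (pvGetD boot (i : Int))) (pvGetD boot (i : Int))) := by
  rcases eq_or_ne (pvPopEnds boot (pvGetD boot (i : Int)) q) [] with h | h
  · have hall := (pvPop_empty_iff boot (pvGetD boot (i : Int)) q).mp h
    rw [pvApp1, h]
    cases q with
    | nil => simp [pvHv]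
    | cons a t =>
      have hlt := hall a (by simp)
      simp [pvHv]
      exact hlt.le
  · have hpre := pvPop_prefix boot (pvGetD boot (i : Int)) q
    have hhead : (pvPopEnds boot (pvGetD boot (i : Int)) q).head? = q.head? :=
      pvHead_of_prefix hpre h
    have hmemlast : (pvPopEnds boot (pvGetD boot (i : Int)) q).getLast?.getD 0 ∈ q :=
      hpre.sublist.mem (pvLastD_mem _ h)
    have h1 := pvPop_last_ge boot (pvGetD boot (i : Int)) q h
    have h2 := pvSorted_head_ge boot q hs _ hmemlast
    have hble : pvGetD boot (i : Int) ≤ pvGetD boot (q.head?.getD 0) := by omega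
    rw [pvApp1]
    cases hq2 : pvPopEnds boot (pvGetD boot (i : Int)) q with
    | nil => exact absurd hq2 h
    | cons a t =>
      have hqh : q.head? = some a := by rw [← hhead, hq2]; simp
      rw [hqh] at hble
      simp only [Option.getD_some] at hble
      simp [pvHv, hqh]
      exact hble

theorem pvGetD_nat (xs : List Int) (i : Nat) (h : i < xs.length) :
    pvGetD xs (i : Int) = xs[i] := by
  simp [pvGetD, PySem.List.pyGet?_natCast, List.getElem?_eq_getElem h]

theorem pvHv_le (boot : List Int) (q : List Int) (hb : pvBoundedQ boot.length q)
    (h : Int) (hh : pvHv boot q = some h) : h ≤ boot.max?.getD 0 := by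
  cases q with
  | nil => simp [pvHv] at hh
  | cons a t =>
    simp [pvHv] at hh
    obtain ⟨i, hi, rfl⟩ := hb a (by simp)
    rw [← hh]
    exact pvVal_le_peak boot i hi

theorem pvFold_sorted (boot : List Int) (l : List Nat) (q : List Int)
    (hs : pvSortedQ boot q) : pvSortedQ boot (l.foldl (pvApp1 boot) q) := by
  induction l generalizing q with
  | nil => exact hs
  | cons i l ih => exact ih _ (pvApp1_sorted boot q i hs)

theorem pvFold_bounded (boot : List Int) (n : Nat) (l : List Nat) (q : List Int)
    (hl : ∀ i ∈ l, i < n) (hb : pvBoundedQ n q) : pvBoundedQ n (l.foldl (pvApp1 boot) q) := by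
  induction l generalizing q with
  | nil => exact hb
  | cons i l ih =>
    exact ih _ (fun j hj => hl j (List.mem_cons_of_mem _ hj))
      (pvApp1_bounded boot n q i (hl i (by simp)) hb)

theorem pvFold_hv_P (boot : List Int) (l : List Nat) (q : List Int)
    (hs : pvSortedQ boot q) (hl : ∀ i ∈ l, i < boot.length)
    (hhv : pvHv boot q = some (boot.max?.getD 0)) :
    pvHv boot (l.foldl (pvApp1 boot) q) = some (boot.max?.getD 0) := by
  induction l generalizing q with
  | nil => exact hhv
  | cons i l ih =>
    refine ih _ (pvApp1_sorted boot q i hs) (fun j hj => hl j (List.mem_cons_of_mem _ hj)) ?_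
    rw [pvApp1_hv boot q i hs, hhv]
    simp [max_eq_left (pvVal_le_peak boot i (hl i (by simp)))]

theorem pvFold_hv_reach (boot : List Int) (l : List Nat) (q : List Int)
    (hs : pvSortedQ boot q) (hb : pvBoundedQ boot.length q)
    (hl : ∀ i ∈ l, i < boot.length)
    (hreach : ∃ j ∈ l, pvGetD boot (j : Int) = boot.max?.getD 0) :
    pvHv boot (l.foldl (pvApp1 boot) q) = some (boot.max?.getD 0) := by
  induction l generalizing q with
  | nil => simp at hreach
  | cons i l ih =>
    have hi : i < boot.length := hl i (by simp)
    have hs' := pvApp1_sorted boot q i hs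
    have hb' := pvApp1_bounded boot boot.length q i hi hb
    by_cases hP : pvGetD boot (i : Int) = boot.max?.getD 0
    · refine pvFold_hv_P boot l _ hs' (fun j hj => hl j (List.mem_cons_of_mem _ hj)) ?_
      rw [pvApp1_hv boot q i hs, hP]
      cases hq : pvHv boot q with
      | none => simp
      | some h =>
        have := pvHv_le boot q hb h hq
        simp [max_eq_right this]
    · have : ∃ j ∈ l, pvGetD boot (j : Int) = boot.max?.getD 0 := by
        rcases hreach with ⟨j, hj, hjP⟩
        rcases List.mem_cons.mp hj with rfl | hj'
        · exact absurd hjP hP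
        · exact ⟨j, hj', hjP⟩
      exact ih _ hs' hb' (fun j hj => hl j (List.mem_cons_of_mem _ hj)) this

-- inner-loop iterations that do not hit the window-length test
theorem pvStepA_no_test (boot proc : List Int) (pm kI : Int) (i : Nat)
    (hi : ((i : Int) + 1) ≠ kI) (q : List Int) (r w : Int) :
    pvStepA boot proc pm kI (q, r, w, 0) (Int.ofNat i) =
      (pvApp1 boot q i, r, w + pvGetD proc (i : Int), 0) := by
  simp [pvStepA, pvApp1, hi]

theorem pvSegNT (boot proc : List Int) (pm kI : Int) (l : List Nat)
    (hl : ∀ i ∈ l, ((i : Int) + 1) ≠ kI) (q : List Int) (r w : Int) :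
    l.foldl (fun st i => pvStepA boot proc pm kI st (Int.ofNat i)) (q, r, w, 0) =
      (l.foldl (pvApp1 boot) q, r, l.foldl (fun (w : Int) (i : Nat) => w + pvGetD proc (i : Int)) w, 0) := by
  induction l generalizing q w with
  | nil => rfl
  | cons i l ih =>
    rw [List.foldl_cons, pvStepA_no_test boot proc pm kI i (hl i (by simp)) q r w,
      List.foldl_cons, List.foldl_cons]
    exact ih (fun j hj => hl j (List.mem_cons_of_mem _ hj)) _ _

-- the single iteration in which pass k tests its window
theorem pvStepA_test (boot proc : List Int) (pm : Int) (m : Nat) (q : List Int) (r w : Int) :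
    pvStepA boot proc pm ((m : Int) + 1) (q, r, w, 0) (Int.ofNat m) =
      (if (0 : Int) = pvGetD (pvApp1 boot q m) 0 then (pvApp1 boot q m).tail
        else pvApp1 boot q m,
       (if pvGetD boot ((pvApp1 boot q m).head?.getD 0) + (w + pvGetD proc (m : Int)) * ((m : Int) + 1) ≤ pm
        then max r ((m : Int) + 1) else r),
       w + pvGetD proc (m : Int) - pvGetD proc 0, 0) := by
  simp [pvStepA, pvApp1]

theorem pvSumFold (proc : List Int) (m : Nat) (hm : m ≤ proc.length) (c : Int) :
    (List.range' 0 m).foldl (fun (w : Int) (i : Nat) => w + pvGetD proc (i : Int)) c = c + (proc.take m).sum := by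
  induction m generalizing c with
  | zero => simp
  | succ m ih =>
    have hsplit : List.range' 0 (m + 1) = List.range' 0 m ++ [m] := by
      have := List.range'_append (s := 0) (m := m) (n := 1) (step := 1)
      simpa using this.symm
    rw [hsplit, List.foldl_append, ih (by omega)]
    simp [pvGetD_nat proc m (by omega), List.sum_take_succ proc m (by omega)]
    ring

def pvInv (boot : List Int) (q : List Int) : Prop :=
  pvSortedQ boot q ∧ pvBoundedQ boot.length q ∧
    (pvHv boot q = some (boot.max?.getD 0) ∨ pvGetD boot 0 = boot.max?.getD 0)

theorem pvPeak_attained (boot : List Int) (hn : 1 ≤ boot.length) :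
    ∃ j : Nat, j < boot.length ∧ pvGetD boot (j : Int) = boot.max?.getD 0 := by
  cases h : boot.max? with
  | none => rw [List.max?_eq_none_iff] at h; simp [h] at hn
  | some a =>
    obtain ⟨ha, -⟩ := List.max?_eq_some_iff.mp h
    obtain ⟨j, hj, hja⟩ := List.mem_iff_getElem.mp ha
    exact ⟨j, hj, by rw [pvGetD_nat boot j hj, hja]; exact rfl⟩

theorem pvGetD_zero_cons (a : Int) (t : List Int) : pvGetD (a :: t) 0 = a := by
  simp [pvGetD]

theorem pvRange_split (n m : Nat) (hm : m < n) :
    List.range n = (List.range' 0 m ++ [m]) ++ List.range' (m + 1) (n - (m + 1)) := by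
  rw [List.range_eq_range']
  have h1 : List.range' 0 m ++ [m] = List.range' 0 (m + 1) := by
    have := List.range'_append (s := 0) (m := m) (n := 1) (step := 1)
    simpa using this
  rw [h1]
  have := List.range'_append (s := 0) (m := m + 1) (n := n - (m + 1)) (step := 1)
  simp at this
  rw [this]
  congr 1
  omega

theorem pvPass_succ (boot proc : List Int) (pm : Int) (hpre : boot.length ≤ proc.length)
    (m : Nat) (hm1 : 1 ≤ m) (hmn : m + 1 ≤ boot.length) (q : List Int) (r : Int)
    (hInv : pvInv boot q) :
    ∃ q', pvPassA boot proc pm ((m : Int) + 1) (q, r) =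
        (q', if pvPA boot proc pm (m + 1) then max r ((m : Int) + 1) else r) ∧
      pvInv boot q' := by
  obtain ⟨hs, hb, hd⟩ := hInv
  unfold pvPassA
  rw [pvRange_split boot.length m (by omega), List.foldl_append, List.foldl_append]
  -- segment before the test
  rw [pvSegNT boot proc pm ((m : Int) + 1) (List.range' 0 m)
      (by intro i hi; rw [List.mem_range'_1] at hi; omega) q r 0]
  set q1 := (List.range' 0 m).foldl (pvApp1 boot) q with hq1
  have hl1 : ∀ i ∈ List.range' 0 m, i < boot.length := by
    intro i hi; rw [List.mem_range'_1] at hi; omega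
  have hs1 : pvSortedQ boot q1 := pvFold_sorted boot _ q hs
  have hb1 : pvBoundedQ boot.length q1 := pvFold_bounded boot _ _ q hl1 hb
  have hhv1 : pvHv boot q1 = some (boot.max?.getD 0) := by
    rcases hd with hd | hd
    · exact pvFold_hv_P boot _ q hs hl1 hd
    · exact pvFold_hv_reach boot _ q hs hb hl1
        ⟨0, by rw [List.mem_range'_1]; omega, hd⟩
  -- the test iteration
  rw [List.foldl_cons, List.foldl_nil, pvSumFold proc m (by omega) 0,
    pvStepA_test boot proc pm m q1 r ((0 : Int) + (proc.take m).sum)]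
  set q2 := pvApp1 boot q1 m with hq2
  have hhv2 : pvHv boot q2 = some (boot.max?.getD 0) := by
    rw [hq2, pvApp1_hv boot q1 m hs1, hhv1]
    simp [max_eq_left (pvVal_le_peak boot m (by omega))]
  obtain ⟨h0, hh0, hvh0⟩ : ∃ h0, q2.head? = some h0 ∧ pvGetD boot h0 = boot.max?.getD 0 := by
    cases hh : q2.head? with
    | none => simp [pvHv, hh] at hhv2
    | some x =>
      refine ⟨x, rfl, ?_⟩
      rw [pvHv, hh] at hhv2
      simpa using hhv2
  have hs2 : pvSortedQ boot q2 := pvApp1_sorted boot q1 m hs1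
  have hb2 : pvBoundedQ boot.length q2 := pvApp1_bounded boot _ q1 m (by omega) hb1
  -- the recorded result is exactly A's pass test
  have hcond : (pvGetD boot (q2.head?.getD 0) + ((0 : Int) + (proc.take m).sum + pvGetD proc (m : Int)) * ((m : Int) + 1) ≤ pm)
      ↔ pvPA boot proc pm (m + 1) := by
    rw [hh0]
    rw [pvPA_iff, if_neg (show ¬ (m + 1 = 1) by omega)]
    simp only [Option.getD_some, hvh0]
    rw [pvGetD_nat proc m (by omega), zero_add,
      ← List.sum_take_succ proc m (by omega)]
    exact Iff.rfl
  -- the conditional front pop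
  have hq2ne : q2 ≠ [] := pvApp1_ne_nil boot q1 m
  set q3 := if (0 : Int) = pvGetD q2 0 then q2.tail else q2 with hq3
  have hInv3 : pvSortedQ boot q3 ∧ pvBoundedQ boot.length q3 ∧
      (pvHv boot q3 = some (boot.max?.getD 0) ∨ pvGetD boot 0 = boot.max?.getD 0) := by
    cases hq2c : q2 with
    | nil => exact absurd hq2c hq2ne
    | cons a t =>
      have ha : a = h0 := by rw [hq2c] at hh0; simpa using hh0
      rw [hq3, hq2c, pvGetD_zero_cons]
      by_cases hz : (0 : Int) = a
      · rw [if_pos hz]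
        refine ⟨List.Pairwise.sublist (List.tail_sublist _) (hq2c ▸ hs2),
          fun e he => (hq2c ▸ hb2) e (List.mem_cons_of_mem _ he), Or.inr ?_⟩
        rw [← hvh0, ← ha, ← hz]
      · rw [if_neg hz]
        exact ⟨hq2c ▸ hs2, hq2c ▸ hb2, Or.inl (by rw [← hq2c, hhv2])⟩
  obtain ⟨hs3, hb3, hd3⟩ := hInv3
  -- segment after the test
  rw [pvSegNT boot proc pm ((m : Int) + 1) (List.range' (m + 1) (boot.length - (m + 1)))
      (by intro i hi; rw [List.mem_range'_1] at hi; omega) q3 _ _]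
  have hif : (if pvGetD boot (q2.head?.getD 0) + ((0 : Int) + (proc.take m).sum + pvGetD proc (m : Int)) * ((m : Int) + 1) ≤ pm
      then max r ((m : Int) + 1) else r) = (if pvPA boot proc pm (m + 1) then max r ((m : Int) + 1) else r) := by
    by_cases hp : pvPA boot proc pm (m + 1)
    · rw [if_pos (hcond.mpr hp), if_pos hp]
    · rw [if_neg (fun hc => hp (hcond.mp hc)), if_neg hp]
  rw [hif]
  refine ⟨_, rfl, ?_, ?_, ?_⟩
  · exact pvFold_sorted boot _ q3 hs3
  · exact pvFold_bounded boot _ _ q3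
      (by intro i hi; rw [List.mem_range'_1] at hi; omega) hb3
  · rcases hd3 with hd3 | hd3
    · exact Or.inl (pvFold_hv_P boot _ q3 hs3
        (by intro i hi; rw [List.mem_range'_1] at hi; omega) hd3)
    · exact Or.inr hd3

theorem pvPass_one (boot proc : List Int) (pm : Int) (hpre : boot.length ≤ proc.length)
    (hn : 1 ≤ boot.length) (r : Int) :
    ∃ q', pvPassA boot proc pm ((0 : Int) + 1) ([], r) =
        (q', if pvPA boot proc pm 1 then max r ((0 : Int) + 1) else r) ∧
      pvSortedQ boot q' ∧ pvBoundedQ boot.length q' ∧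
      (2 ≤ boot.length → pvInv boot q') := by
  unfold pvPassA
  rw [pvRange_split boot.length 0 (by omega), List.foldl_append, List.foldl_append]
  rw [show ((List.range' 0 0 : List Nat)) = [] from rfl, List.foldl_nil, List.foldl_cons,
    List.foldl_nil]
  rw [show ((0 : Int) + 1) = ((0 : Nat) : Int) + 1 by norm_num,
    pvStepA_test boot proc pm 0 [] r 0]
  have happ : pvApp1 boot [] 0 = [(0 : Int)] := by
    unfold pvApp1 pvPopEnds
    simp
  rw [happ]
  have hcond : (pvGetD boot (([(0 : Int)]).head?.getD 0) + (0 + pvGetD proc ((0 : Nat) : Int)) * (((0 : Nat) : Int) + 1) ≤ pm)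
      ↔ pvPA boot proc pm 1 := by
    unfold pvPA
    rw [if_pos rfl]
    have : (proc.take 1).sum = pvGetD proc 0 := by
      rw [show (1 : Nat) = 0 + 1 from rfl, List.sum_take_succ proc 0 (by omega)]
      simpa using (pvGetD_nat proc 0 (by omega)).symm
    rw [this]
    simp
  rw [show pvGetD [(0 : Int)] 0 = (0 : Int) from pvGetD_zero_cons 0 [], if_pos rfl]
  rw [show ([(0 : Int)]).tail = ([] : List Int) from rfl]
  rw [pvSegNT boot proc pm (((0 : Nat) : Int) + 1) (List.range' 1 (boot.length - 1))
      (by intro i hi; rw [List.mem_range'_1] at hi; push_cast; omega) [] _ _]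
  have hif : (if pvGetD boot (([(0 : Int)]).head?.getD 0) + (0 + pvGetD proc ((0 : Nat) : Int)) * (((0 : Nat) : Int) + 1) ≤ pm
      then max r (((0 : Nat) : Int) + 1) else r) = (if pvPA boot proc pm 1 then max r ((0 : Int) + 1) else r) := by
    by_cases hp : pvPA boot proc pm 1
    · rw [if_pos (hcond.mpr hp), if_pos hp]
      norm_num
    · rw [if_neg (fun hc => hp (hcond.mp hc)), if_neg hp]
  rw [hif]
  refine ⟨_, rfl, ?_, ?_, ?_⟩
  · exact pvFold_sorted boot _ [] (by simp [pvSortedQ])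
  · exact pvFold_bounded boot _ _ []
      (by intro i hi; rw [List.mem_range'_1] at hi; omega) (by intro e he; simp at he)
  · intro h2
    refine ⟨pvFold_sorted boot _ [] (by simp [pvSortedQ]),
      pvFold_bounded boot _ _ []
        (by intro i hi; rw [List.mem_range'_1] at hi; omega) (by intro e he; simp at he), ?_⟩
    obtain ⟨j, hj, hjP⟩ := pvPeak_attained boot hn
    rcases Nat.eq_zero_or_pos j with rfl | hj1
    · exact Or.inr hjP
    · refine Or.inl (pvFold_hv_reach boot _ [] (by simp [pvSortedQ])
        (by intro e he; simp at he)
        (by intro i hi; rw [List.mem_range'_1] at hi; omega)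
        ⟨j, by rw [List.mem_range'_1]; omega, hjP⟩)

theorem pvOuter (boot proc : List Int) (pm : Int) (hpre : boot.length ≤ proc.length)
    (m : Nat) (hm1 : 1 ≤ m) (hmn : m ≤ boot.length) :
    ∃ q', (List.range m).foldl
        (fun qr i => pvPassA boot proc pm (Int.ofNat i + 1) qr) ([], 0) =
        (q', (pvGA boot proc pm m : Int)) ∧ (m < boot.length → pvInv boot q') := by
  induction m with
  | zero => omega
  | succ m ih =>
    rcases Nat.eq_zero_or_pos m with rfl | hm
    · rw [List.range_one, List.foldl_cons, List.foldl_nil]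
      obtain ⟨q', hq', hs', hb', hinv'⟩ := pvPass_one boot proc pm hpre (by omega) 0
      refine ⟨q', ?_, fun hlt => hinv' (by omega)⟩
      rw [show (Int.ofNat 0 + 1) = ((0 : Int) + 1) from rfl, hq']
      congr 1
      by_cases hp : pvPA boot proc pm 1 <;> simp [pvGA, hp]
    · obtain ⟨q', hq', hinv'⟩ := ih (by omega) (by omega)
      have hInv : pvInv boot q' := hinv' (by omega)
      rw [List.range_succ, List.foldl_append, hq', List.foldl_cons, List.foldl_nil]
      obtain ⟨q'', hq'', hInv''⟩ := pvPass_succ boot proc pm hpre m hm (by omega)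
        q' (pvGA boot proc pm m : Int) hInv
      refine ⟨q'', ?_, fun _ => hInv''⟩
      rw [show (Int.ofNat m + 1) = ((m : Int) + 1) from rfl, hq'']
      congr 1
      have hle := pvGA_le boot proc pm m
      by_cases hp : pvPA boot proc pm (m + 1)
      · rw [if_pos hp]
        conv_rhs => unfold pvGA
        rw [if_pos hp, max_eq_right (by omega)]
        push_cast
        ring
      · rw [if_neg hp]
        conv_rhs => unfold pvGA
        rw [if_neg hp]

theorem pvA_eq_gA (boot proc : List Int) (pm : Int) (hpre : boot.length ≤ proc.length) :
    powerConsumption boot proc pm = (pvGA boot proc pm boot.length : Int) := by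
  unfold powerConsumption
  rcases Nat.eq_zero_or_pos boot.length with hn | hn
  · rw [hn]
    simp [pvGA]
  · obtain ⟨q', hq', -⟩ := pvOuter boot proc pm hpre boot.length hn le_rfl
    rw [hq']

-- ---- the comparison ----

theorem pvGB_succ_ge (boot proc : List Int) (pm : Int) (m : Nat) :
    pvGB boot proc pm m ≤ pvGB boot proc pm (m + 1) := by
  have := pvGB_le boot proc pm m
  conv_rhs => unfold pvGB
  split <;> omega

theorem pvGA_le_gB (boot proc : List Int) (pm : Int) (m : Nat) (hm : m ≤ boot.length) :
    pvGA boot proc pm m ≤ pvGB boot proc pm m := by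
  induction m with
  | zero => simp [pvGA, pvGB]
  | succ m ih =>
    have hle := pvGB_succ_ge boot proc pm m
    have ih' := ih (by omega)
    conv_lhs => unfold pvGA
    split
    · rename_i hp
      have : pvPrefFeas boot proc pm (m + 1) :=
        pvPA_imp_pref boot proc pm (m + 1) (by omega) hm hp
      unfold pvGB; rw [if_pos this]
    · omega

theorem pvOk_diag (b p : List Int) (m : Int) (k : Nat) :
    pvOk b p m k k ↔ pvPrefFeas b p m k = true := by
  rw [pvPref_iff]

theorem pvOk_peak (b p : List Int) (m : Int) (k : Nat) :
    pvOk b p m b.length k ↔ b.max?.getD 0 + (p.take k).sum * (k : Int) ≤ m := by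
  unfold pvOk
  rw [List.take_length]

theorem pvGA_eq_gB_of_notD (boot proc : List Int) (pm : Int)
    (hD : ¬ D_powerConsumption boot proc pm) :
    pvGA boot proc pm boot.length = pvGB boot proc pm boot.length := by
  by_contra hne
  have hle := pvGA_le_gB boot proc pm boot.length le_rfl
  set K := pvGB boot proc pm boot.length with hK
  have hlt : pvGA boot proc pm boot.length < K := by omega
  have hKn : K ≤ boot.length := pvGB_le boot proc pm boot.length
  have hKpass : pvPrefFeas boot proc pm K := by
    rcases pvGB_spec_pass boot proc pm boot.length with h | h
    · omega
    · exact h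
  by_cases h1 : K = 1
  · have : pvPA boot proc pm 1 := (pvPA_one_iff boot proc pm (by omega)).mpr (h1 ▸ hKpass)
    have := pvGA_ge boot proc pm boot.length 1 (by omega) this
    omega
  · have hK2 : 2 ≤ K := by omega
    apply hD
    refine ⟨K, hKn, hK2, (pvOk_diag boot proc pm K).mpr hKpass, ?_, ?_⟩
    · intro hpk
      have hpa : pvPA boot proc pm K := by
        rw [pvPA_iff, if_neg h1]
        exact (pvOk_peak boot proc pm K).mp hpk
      have := pvGA_ge boot proc pm boot.length K hKn hpa
      omega
    · intro j hj hok
      have := pvGB_ge boot proc pm boot.length j hj ((pvOk_diag boot proc pm j).mp hok)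
      omega

theorem pvGA_ne_gB_of_D (boot proc : List Int) (pm : Int)
    (hD : D_powerConsumption boot proc pm) :
    pvGA boot proc pm boot.length ≠ pvGB boot proc pm boot.length := by
  obtain ⟨k, hklt, hk2, hok, hpeak, hmax⟩ := hD
  have hgeb : k ≤ pvGB boot proc pm boot.length :=
    pvGB_ge boot proc pm boot.length k hklt ((pvOk_diag boot proc pm k).mp hok)
  have hleb : pvGB boot proc pm boot.length ≤ k := by
    by_contra hgt
    have hBn := pvGB_le boot proc pm boot.length
    have : pvPrefFeas boot proc pm (pvGB boot proc pm boot.length) := by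
      rcases pvGB_spec_pass boot proc pm boot.length with h | h
      · omega
      · exact h
    have := hmax _ hBn ((pvOk_diag boot proc pm _).mpr this)
    omega
  have hB : pvGB boot proc pm boot.length = k := by omega
  rw [hB]
  intro hA
  have : pvPA boot proc pm k := by
    rcases pvGA_spec_pass boot proc pm boot.length with h | h
    · omega
    · rwa [hA] at h
  rw [pvPA_iff, if_neg (show ¬ (k = 1) by omega)] at this
  exact hpeak ((pvOk_peak boot proc pm k).mpr this)

-- ===== VERDICT (by name: the statement is the Claim_ definition above) =====
theorem powerConsumption_spec : Claim_unchanged_powerConsumption := by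
  intro boot proc pm _ hpre hD
  rw [pvA_eq_gA boot proc pm hpre, pvAlt_eq_gB boot proc pm hpre,
    pvGA_eq_gB_of_notD boot proc pm hD]
theorem powerConsumption_changed : Claim_changed_powerConsumption := by unfold Claim_changed_powerConsumption; decide
theorem powerConsumption_tight : Claim_exact_powerConsumption := by
  intro boot proc pm _ hpre hD
  rw [pvA_eq_gA boot proc pm hpre, pvAlt_eq_gB boot proc pm hpre]
  exact fun h => pvGA_ne_gB_of_D boot proc pm hD (by exact_mod_cast h)
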